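-- pv_equiv track=rewrite | github.com/hoo29/advent-of-code-20 | 14/main.py | gen_masks
-- ===== SOURCE A (Python) =====
-- def gen_masks(offset: str):
--     values: list[str] = []
--     x_ind = -1
--     try:
--         x_ind = offset.index('X')
--     except ValueError:
--         return [offset]
--
--     bits = [offset[:x_ind]]
--
--     for float_bit in ['0', '1']:
--         sub_bits = gen_masks(float_bit + offset[x_ind + 1:])
--         for bit in bits:
--             for sub_bit in sub_bits:
--                 values.append(bit + sub_bit)
--
--     return values
-- ===== SOURCE B (Python) =====
-- def gen_masks(offset: str):
--     results = ['']
--     for c in offset: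
--         if c == 'X':
--             results = [r + b for r in results for b in '01']
--         else:
--             results = [r + c for r in results]
--     return results
-- ===== Notes on version B (the rewrite author's own statement) =====
-- stated objective: simpler
-- what changed: Replaced A's recursion that splits at the first 'X' (with try/except around str.index and slicing) by a single left-to-right fold over the characters that extends every partial result, doubling it at each 'X'.
import Mathlib
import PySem

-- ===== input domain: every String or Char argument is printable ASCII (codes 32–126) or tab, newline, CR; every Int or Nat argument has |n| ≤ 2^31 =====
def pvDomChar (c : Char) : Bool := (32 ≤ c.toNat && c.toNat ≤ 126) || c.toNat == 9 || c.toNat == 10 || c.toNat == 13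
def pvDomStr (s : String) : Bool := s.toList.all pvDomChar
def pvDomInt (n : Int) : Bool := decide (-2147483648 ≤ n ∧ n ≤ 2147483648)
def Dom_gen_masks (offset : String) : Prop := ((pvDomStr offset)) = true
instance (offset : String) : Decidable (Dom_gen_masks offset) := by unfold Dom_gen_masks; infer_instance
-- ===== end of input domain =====

-- B replaces A's recursion at the first 'X' by one left-to-right fold extending every partial result; objective: simpler.

-- ===== PORT A =====
-- port of `offset.index('X')` (first index of 'X', none = ValueError)
def pvFindX : List Char → Option Nat
  | [] => none
  | c :: cs => if c = 'X' then some 0 else (pvFindX cs).map (· + 1)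

theorem pvFindX_count_lt : ∀ (cs : List Char) (i : Nat), pvFindX cs = some i →
    (cs.drop (i + 1)).count 'X' < cs.count 'X' := by
  intro cs
  induction cs with
  | nil => intro i h; simp [pvFindX] at h
  | cons c cs ih =>
    intro i h
    by_cases hc : c = 'X'
    · simp [pvFindX, hc] at h
      subst h
      simp [hc]
    · simp [pvFindX, hc] at h
      obtain ⟨j, hj, rfl⟩ := h
      have := ih j hj
      simpa [List.count_cons, hc] using this

-- recursive body of A over the character list
def genMasksA (cs : List Char) : List (List Char) :=
  match h : pvFindX cs with
  | none => [cs]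
  | some i =>
    let pre := cs.take i
    let suf := cs.drop (i + 1)
    let bits : List (List Char) := [pre]
    (['0', '1'] : List Char).attach.flatMap (fun b =>
      bits.flatMap (fun bit => (genMasksA (b.1 :: suf)).map (fun sub => bit ++ sub)))
termination_by cs.count 'X'
decreasing_by
  have hb : b.1 = '0' ∨ b.1 = '1' := by
    have := b.2; simpa using this
  have hbx : b.1 ≠ 'X' := by rcases hb with h' | h' <;> simp [h']
  have := pvFindX_count_lt cs i h
  simpa [List.count_cons, hbx] using this

def gen_masks (offset : String) : List String :=
  (genMasksA offset.toList).map String.ofList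

-- ===== PORT B =====
def stepB (acc : List (List Char)) (c : Char) : List (List Char) :=
  if c = 'X' then acc.flatMap (fun r => [r ++ ['0'], r ++ ['1']])
  else acc.map (fun r => r ++ [c])

def gen_masks_alt (offset : String) : List String :=
  ((offset.toList.foldl stepB [[]]).map String.ofList)

-- ===== PRECONDITION & SPEC =====
def Spec_gen_masks (offset : String) (out : List String) : Prop := out = gen_masks_alt offset
instance (offset : String) (out : List String) : Decidable (Spec_gen_masks offset out) := by unfold Spec_gen_masks; infer_instance

-- ===== CLAIM (what is proved, stated in full; the proofs are below) =====
def Claim_equal_gen_masks : Prop := ∀ (offset : String), Dom_gen_masks offset → Spec_gen_masks offset (gen_masks offset)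

-- ===== LEMMAS AND PROOFS =====

-- reference expansion: replace each 'X' (left = most significant, '0' before '1')
def expandE : List Char → List (List Char)
  | [] => [[]]
  | c :: cs =>
    if c = 'X' then (expandE cs).map ('0' :: ·) ++ (expandE cs).map ('1' :: ·)
    else (expandE cs).map (c :: ·)

theorem pvFindX_none {cs : List Char} (h : pvFindX cs = none) : 'X' ∉ cs := by
  induction cs with
  | nil => simp
  | cons c cs ih =>
    by_cases hc : c = 'X'
    · simp [pvFindX, hc] at h
    · simp [pvFindX, hc] at h
      simp [ih h]
      intro hx; exact hc hx.symm

theorem pvFindX_split : ∀ (cs : List Char) (i : Nat), pvFindX cs = some i →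
    cs = cs.take i ++ 'X' :: cs.drop (i + 1) ∧ 'X' ∉ cs.take i := by
  intro cs
  induction cs with
  | nil => intro i h; simp [pvFindX] at h
  | cons c cs ih =>
    intro i h
    by_cases hc : c = 'X'
    · simp [pvFindX, hc] at h
      subst h
      simp [hc]
    · simp [pvFindX, hc] at h
      obtain ⟨j, hj, rfl⟩ := h
      obtain ⟨h1, h2⟩ := ih j hj
      constructor
      · simpa using congrArg (c :: ·) h1
      · simp [h2]
        intro hx; exact hc hx.symm

theorem expandE_noX {pre : List Char} (h : 'X' ∉ pre) : ∀ rest,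
    expandE (pre ++ rest) = (expandE rest).map (pre ++ ·) := by
  induction pre with
  | nil => intro rest; simp
  | cons c pre ih =>
    intro rest
    have hc : c ≠ 'X' := fun hc => h (by simp [hc])
    have hpre : 'X' ∉ pre := fun hx => h (by simp [hx])
    simp [expandE, hc, ih hpre, List.map_map]

theorem genMasksA_eq_expandE : ∀ (cs : List Char), genMasksA cs = expandE cs := by
  intro cs
  induction hn : cs.count 'X' using Nat.strong_induction_on generalizing cs with
  | _ n ih =>
    rw [genMasksA]
    cases h : pvFindX cs with
    | none =>
      have hx := pvFindX_none h
      have : expandE cs = [cs] := by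
        clear h hn
        induction cs with
        | nil => simp [expandE]
        | cons c cs ihc =>
          have hc : c ≠ 'X' := fun hc => hx (by simp [hc])
          have : 'X' ∉ cs := fun hx' => hx (by simp [hx'])
          simp [expandE, hc, ihc this]
      simp [this]
    | some i =>
      obtain ⟨hsplit, hpre⟩ := pvFindX_split cs i h
      have hlt := pvFindX_count_lt cs i h
      have h0 : genMasksA ('0' :: cs.drop (i + 1)) = expandE ('0' :: cs.drop (i + 1)) :=
        ih _ (by simpa [List.count_cons, hn] using hlt) _ rfl
      have h1 : genMasksA ('1' :: cs.drop (i + 1)) = expandE ('1' :: cs.drop (i + 1)) :=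
        ih _ (by simpa [List.count_cons, hn] using hlt) _ rfl
      simp only [List.attach, List.attachWith, List.pmap, List.flatMap,
        List.map_cons, List.map_nil, List.flatten]
      rw [h0, h1]
      conv_rhs => rw [hsplit]
      rw [expandE_noX hpre]
      simp [expandE, List.map_map]

theorem foldl_stepB : ∀ (cs : List Char) (acc : List (List Char)),
    List.foldl stepB acc cs = acc.flatMap (fun r => (expandE cs).map (r ++ ·)) := by
  intro cs
  induction cs with
  | nil => intro acc; simp [expandE]
  | cons c cs ih =>
    intro acc
    by_cases hc : c = 'X'
    · subst hc
      rw [List.foldl_cons, ih, stepB, if_pos rfl, List.flatMap_assoc]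

      congr 1
      funext r
      simp [expandE, List.map_map, Function.comp_def, List.append_assoc]
    · simp only [List.foldl_cons, ih, stepB, expandE, if_neg hc, List.flatMap_map]
      congr 1
      funext r
      simp [List.map_map, Function.comp_def, List.append_assoc]

-- ===== VERDICT (by name: the statement is the Claim_ definition above) =====
theorem gen_masks_spec : Claim_equal_gen_masks := by
  intro offset _
  unfold Spec_gen_masks gen_masks gen_masks_alt
  rw [genMasksA_eq_expandE, foldl_stepB]
  simp
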